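-- pv_equiv track=rewrite | github.com/davehuh/algorithms | course4/week2/tsp.py | set_generator
-- ===== SOURCE A (Python) =====
-- from itertools import combinations
--
-- def set_generator(source, budget_size, num_cities):
--     iterable = range(1, num_cities)
--     sets = combinations(iterable, budget_size)
--
--     final_sets = []
--
--     for a_set in sets:
--         if source in a_set:
--             final_sets.append(a_set)
--
--     return final_sets
-- ===== SOURCE B (Python) =====
-- from itertools import combinations
--
-- def set_generator(source, budget_size, num_cities):
--     # Fix the source city: enumerate combinations of the OTHER cities of size
--     # budget_size-1 and splice source back in at its sorted position.
--     if budget_size < 1 or source < 1 or source >= num_cities: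
--         return []
--     others = [c for c in range(1, num_cities) if c != source]
--     result = []
--     for combo in combinations(others, budget_size - 1):
--         pos = 0
--         while pos < len(combo) and combo[pos] < source:
--             pos += 1
--         result.append(combo[:pos] + (source,) + combo[pos:])
--     return result
-- ===== Notes on version B (the rewrite author's own statement) =====
-- stated objective: alternative
-- what changed: A enumerates all C(n-1,k) k-combinations of range(1,num_cities) and keeps those containing source; B fixes source, enumerates only the C(n-2,k-1) (k-1)-combinations of the other cities and inserts source at its sorted position, so no combination is generated and discarded (intended as faster; a timing run could not confirm it at the largest sizes).
import Mathlib
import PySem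

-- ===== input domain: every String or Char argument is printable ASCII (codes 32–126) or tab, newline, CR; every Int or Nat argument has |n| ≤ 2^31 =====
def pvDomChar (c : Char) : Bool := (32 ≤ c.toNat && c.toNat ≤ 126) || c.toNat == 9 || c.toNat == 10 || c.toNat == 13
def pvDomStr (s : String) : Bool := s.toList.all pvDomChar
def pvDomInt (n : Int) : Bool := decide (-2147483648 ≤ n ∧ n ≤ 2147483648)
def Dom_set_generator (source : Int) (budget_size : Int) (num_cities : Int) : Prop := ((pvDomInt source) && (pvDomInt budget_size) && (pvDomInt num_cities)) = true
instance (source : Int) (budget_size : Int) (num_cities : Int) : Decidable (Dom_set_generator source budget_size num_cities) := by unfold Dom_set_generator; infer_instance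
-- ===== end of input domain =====

-- B fixes the source city and enumerates only the (k-1)-combinations of the other
-- cities, inserting source at its sorted position, so no combination is generated and discarded.

-- ===== PORT A =====
-- itertools.combinations(l, k) in lexicographic-by-position order
-- (recursion on k so evaluation depth is the combination size, not the list length)
def pvComb : List Int → Nat → List (List Int)
  | _, 0 => [[]]
  | l, k+1 =>
    if l.length < k+1 then []  -- CPython's combinations: 'if r > n: return'
    else l.tails.flatMap (fun t => match t with
      | [] => []
      | x :: xs => (pvComb xs k).map (x :: ·))
  termination_by _ k => k

def set_generator (source : Int) (budget_size : Int) (num_cities : Int) : List (List Int) :=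
  let iterable := PySem.List.pyRange 1 num_cities 1
  if budget_size < 0 then []  -- Python raises ValueError here; outside Pre_
  else
    let sets := pvComb iterable budget_size.toNat
    sets.foldl (fun acc c => if source ∈ c then acc ++ [c] else acc) []

-- ===== PORT B =====
-- the while-loop insertion of Source B: walk past elements < x, splice x in
def pvInsS (x : Int) : List Int → List Int
  | [] => [x]
  | y :: ys => if y < x then y :: pvInsS x ys else x :: y :: ys

def set_generator_alt (source : Int) (budget_size : Int) (num_cities : Int) : List (List Int) :=
  if budget_size < 1 ∨ source < 1 ∨ num_cities ≤ source then []
  else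
    let others := (PySem.List.pyRange 1 num_cities 1).filter (fun c => c != source)
    (pvComb others (budget_size - 1).toNat).map (pvInsS source)

-- ===== PRECONDITION & SPEC =====
-- Pre_ excludes only budget_size < 0, where A raises ValueError from itertools.combinations; B returns [] there.
def Pre_set_generator (source : Int) (budget_size : Int) (num_cities : Int) : Prop :=
  0 ≤ budget_size
instance (source : Int) (budget_size : Int) (num_cities : Int) : Decidable (Pre_set_generator source budget_size num_cities) := by unfold Pre_set_generator; infer_instance
def pvWitness_set_generator : Int × Int × Int := (2, 2, 5)

def Spec_set_generator (source : Int) (budget_size : Int) (num_cities : Int) (out : List (List Int)) : Prop := out = set_generator_alt source budget_size num_cities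
instance (source : Int) (budget_size : Int) (num_cities : Int) (out : List (List Int)) : Decidable (Spec_set_generator source budget_size num_cities out) := by unfold Spec_set_generator; infer_instance

-- ===== CLAIM (what is proved, stated in full; the proofs are below) =====
def Claim_equal_set_generator : Prop := ∀ (source : Int) (budget_size : Int) (num_cities : Int), Dom_set_generator source budget_size num_cities → Pre_set_generator source budget_size num_cities → Spec_set_generator source budget_size num_cities (set_generator source budget_size num_cities)

-- ===== LEMMAS AND PROOFS =====

-- the textbook recursive equations for pvComb (used by all proofs below)
theorem pvComb_zero (l : List Int) : pvComb l 0 = [[]] := by rw [pvComb]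

theorem pvComb_nil_succ (k : Nat) : pvComb [] (k+1) = [] := by rw [pvComb]; rfl

theorem pvComb_eq_nil {l : List Int} {k : Nat} (h : l.length < k) : pvComb l k = [] := by
  cases k with
  | zero => omega
  | succ k' => rw [pvComb, if_pos h]

theorem pvComb_cons (x : Int) (xs : List Int) (k : Nat) :
    pvComb (x :: xs) (k+1) = (pvComb xs k).map (x :: ·) ++ pvComb xs (k+1) := by
  by_cases h2 : xs.length < k + 1
  · by_cases h1 : xs.length < k
    · rw [pvComb, if_pos (by simp; omega), pvComb_eq_nil h1, pvComb_eq_nil h2]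
      simp
    · rw [pvComb, if_neg (by simp; omega), List.tails_cons, List.flatMap_cons,
        pvComb_eq_nil h2]
      have hnil : xs.tails.flatMap (fun t => match t with
          | [] => ([] : List (List Int))
          | y :: ys => (pvComb ys k).map (y :: ·)) = [] := by
        rw [List.flatMap_eq_nil_iff]
        intro t ht
        match t with
        | [] => rfl
        | y :: ys =>
          have hsuf : (y :: ys) <:+ xs := (List.mem_tails _ _).mp ht
          have hlen : ys.length < k := by
            have := hsuf.length_le
            simp at this
            omega
          simp only [pvComb_eq_nil hlen, List.map_nil]
      rw [hnil]
  · rw [pvComb, if_neg (by simp; omega), List.tails_cons, List.flatMap_cons]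
    conv_rhs => rw [pvComb]
    rw [if_neg h2]

-- every element of a combination comes from the source list
theorem pvComb_subset : ∀ (l : List Int) (k : Nat) (c : List Int), c ∈ pvComb l k → ∀ a ∈ c, a ∈ l := by
  intro l
  induction l with
  | nil =>
    intro k c hc a ha
    cases k with
    | zero => simp [pvComb_zero] at hc; subst hc; simp at ha
    | succ k => simp [pvComb_nil_succ] at hc
  | cons x xs ih =>
    intro k c hc a ha
    cases k with
    | zero => simp [pvComb_zero] at hc; subst hc; simp at ha
    | succ k =>
      rw [pvComb_cons] at hc
      simp at hc
      rcases hc with ⟨d, hd, rfl⟩ | hc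
      · rcases List.mem_cons.mp ha with rfl | ha
        · simp
        · exact List.mem_cons_of_mem _ (ih k d hd a ha)
      · exact List.mem_cons_of_mem _ (ih (k+1) c hc a ha)

theorem pvInsS_all_gt (s : Int) (c : List Int) (h : ∀ y ∈ c, s < y) :
    pvInsS s c = s :: c := by
  cases c with
  | nil => rfl
  | cons y ys =>
    have := h y (by simp)
    simp [pvInsS]
    omega

theorem pvInsS_cons_lt (s x : Int) (c : List Int) (h : x < s) :
    pvInsS s (x :: c) = x :: pvInsS s c := by
  simp [pvInsS, h]

-- main lemma: filtering (k+1)-combinations of a strictly sorted list for those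
-- containing s = inserting s into the k-combinations of the list without s
theorem pvComb_filter_main (s : Int) : ∀ (l : List Int) (k : Nat),
    l.Pairwise (· < ·) → s ∈ l →
    (pvComb l (k+1)).filter (fun c => decide (s ∈ c)) =
      (pvComb (l.filter (fun c => c != s)) k).map (pvInsS s) := by
  intro l
  induction l with
  | nil => intro k _ hs; simp at hs
  | cons x xs ih =>
    intro k hp hs
    have hpx : ∀ y ∈ xs, x < y := fun y hy => (List.pairwise_cons.mp hp).1 y hy
    have hpxs : xs.Pairwise (· < ·) := (List.pairwise_cons.mp hp).2
    by_cases hxs : x = s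
    · -- head is s: keep all of the first block, drop the rest
      subst hxs
      have hnx : x ∉ xs := fun h => lt_irrefl x (hpx x h)
      have h1 : ((pvComb xs k).map (x :: ·)).filter (fun c => decide (x ∈ c)) =
          (pvComb xs k).map (x :: ·) := by
        apply List.filter_eq_self.mpr
        intro c hc
        simp at hc
        rcases hc with ⟨d, _, rfl⟩
        simp
      have h2 : (pvComb xs (k+1)).filter (fun c => decide (x ∈ c)) = [] := by
        apply List.filter_eq_nil_iff.mpr
        intro c hc
        simp
        intro hxc
        exact hnx (pvComb_subset xs (k+1) c hc x hxc)
      have hflt : xs.filter (fun c => c != x) = xs := by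
        apply List.filter_eq_self.mpr
        intro y hy
        simp
        intro h; subst h; exact hnx hy
      have hins : ∀ c ∈ pvComb xs k, pvInsS x c = x :: c := by
        intro c hc
        exact pvInsS_all_gt x c (fun y hy => hpx y (pvComb_subset xs k c hc y hy))
      simp only [pvComb_cons, List.filter_append, h1, h2, List.append_nil,
        List.filter_cons, hflt]
      simp only [bne_self_eq_false, Bool.false_eq_true, if_false]
      rw [List.map_congr_left hins]
    · -- head ≠ s, so s ∈ xs and x < s
      have hs' : s ∈ xs := by
        rcases List.mem_cons.mp hs with h | h
        · exact absurd h.symm hxs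
        · exact h
      have hxlt : x < s := hpx s hs'
      have hflt : (x :: xs).filter (fun c => c != s) =
          x :: xs.filter (fun c => c != s) := by
        simp [List.filter_cons]
        exact hxs
      have hmapfilter : ∀ (m : Nat),
          ((pvComb xs m).map (x :: ·)).filter (fun c => decide (s ∈ c)) =
            ((pvComb xs m).filter (fun c => decide (s ∈ c))).map (x :: ·) := by
        intro m
        rw [List.filter_map]
        congr 1
        apply List.filter_congr
        intro c _
        simp [Function.comp]
        intro h; exact absurd h.symm hxs
      have hsx : ¬ s = x := fun h => hxs h.symm
      cases k with
      | zero =>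
        -- LHS: only [x] from the first block (no s), plus IH at k=0 gives [[s]]
        have hA : (pvComb (x :: xs) 1).filter (fun c => decide (s ∈ c)) =
            (pvComb (xs.filter (fun c => c != s)) 0).map (pvInsS s) := by
          simp only [pvComb_cons, List.filter_append]
          rw [ih 0 hpxs hs']
          simp [pvComb_zero, hsx]
        rw [hA, hflt]
        simp [pvComb_zero]
      | succ k' =>
        have hxmem : ∀ c ∈ pvComb (xs.filter (fun c => c != s)) k',
            pvInsS s (x :: c) = x :: pvInsS s c := fun c _ => pvInsS_cons_lt s x c hxlt
        calc (pvComb (x :: xs) (k'+1+1)).filter (fun c => decide (s ∈ c))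
            = ((pvComb xs (k'+1)).filter (fun c => decide (s ∈ c))).map (x :: ·) ++
              (pvComb xs (k'+1+1)).filter (fun c => decide (s ∈ c)) := by
              simp only [pvComb_cons, List.filter_append, hmapfilter]
          _ = ((pvComb (xs.filter (fun c => c != s)) k').map (pvInsS s)).map (x :: ·) ++
              (pvComb (xs.filter (fun c => c != s)) (k'+1)).map (pvInsS s) := by
              rw [ih k' hpxs hs', ih (k'+1) hpxs hs']
          _ = (pvComb ((x :: xs).filter (fun c => c != s)) (k'+1)).map (pvInsS s) := by
              rw [hflt]
              simp only [pvComb_cons, List.map_append, List.map_map]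
              congr 1
              apply List.map_congr_left
              intro c hc
              simp [Function.comp]
              exact (hxmem c hc).symm

-- ===== VERDICT (by name: the statement is the Claim_ definition above) =====
theorem set_generator_spec : Claim_equal_set_generator := by
  intro source budget_size num_cities _ hpre
  unfold Pre_set_generator at hpre
  unfold Spec_set_generator set_generator set_generator_alt
  simp only
  rw [if_neg (by omega : ¬ budget_size < 0)]
  rw [PySem.List.foldl_append_ite_eq_filter]
  simp only [List.nil_append]
  by_cases hk : budget_size < 1
  · -- budget_size = 0: A filters [[]] (s ∉ []) to []; B's guard returns []
    have : budget_size = 0 := by omega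
    subst this
    simp [pvComb_zero]
  · by_cases hsrc : source < 1 ∨ num_cities ≤ source
    · -- source not in range: no combination contains it
      rw [if_pos (Or.inr hsrc)]
      apply List.filter_eq_nil_iff.mpr
      intro c hc
      simp
      intro hmem
      have := pvComb_subset _ _ c hc source hmem
      rw [PySem.List.mem_pyRange_one] at this
      omega
    · rw [if_neg (by tauto)]
      rw [not_or, not_lt, not_le] at hsrc
      have hmem : source ∈ PySem.List.pyRange 1 num_cities 1 :=
        PySem.List.mem_pyRange_one.mpr ⟨hsrc.1, hsrc.2⟩
      have hkk : budget_size.toNat = (budget_size - 1).toNat + 1 := by omega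
      rw [hkk]
      exact pvComb_filter_main source _ _ (PySem.List.pairwise_lt_pyRange_one 1 num_cities) hmem
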